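-- pv_equiv track=rewrite | github.com/leanprover/lean4 | script/profiler/lean_demangle.py | _match_suffix
-- ===== SOURCE A (Python) =====
-- _SUFFIX_FLAGS_EXACT = {
--     '_redArg':  'arity\u2193',
--     '_boxed':   'boxed',
--     '_impl':    'impl',
-- }
--
-- _SUFFIX_FLAGS_PREFIX = {
--     '_lam':     '\u03bb',
--     '_lambda':  '\u03bb',
--     '_elam':    '\u03bb',
--     '_jp':      'jp',
--     '_closed':  'closed',
-- }
--
-- def _match_suffix(component):
--     """
--     Check if a string component is a compiler-generated suffix.
--     Returns the flag label or None.
--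
--     Handles both exact matches (_redArg, _boxed) and indexed suffixes
--     (_lam_0, _lambda_2, _closed_0) produced by appendIndexAfter.
--     """
--     if not isinstance(component, str):
--         return None
--     if component in _SUFFIX_FLAGS_EXACT:
--         return _SUFFIX_FLAGS_EXACT[component]
--     if component in _SUFFIX_FLAGS_PREFIX:
--         return _SUFFIX_FLAGS_PREFIX[component]
--     # Check for indexed suffix: prefix + _N
--     for prefix, label in _SUFFIX_FLAGS_PREFIX.items():
--         if component.startswith(prefix + '_'):
--             rest = component[len(prefix) + 1:]
--             if rest.isdigit():
--                 return label
--     return None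
-- ===== SOURCE B (Python) =====
-- _SUFFIX_FLAGS_EXACT = {
--     '_redArg':  'arity\u2193',
--     '_boxed':   'boxed',
--     '_impl':    'impl',
-- }
--
-- _SUFFIX_FLAGS_PREFIX = {
--     '_lam':     '\u03bb',
--     '_lambda':  '\u03bb',
--     '_elam':    '\u03bb',
--     '_jp':      'jp',
--     '_closed':  'closed',
-- }
--
--
-- def _match_suffix(component):
--     if not isinstance(component, str):
--         return None
--     label = _SUFFIX_FLAGS_EXACT.get(component)
--     if label is not None:
--         return label
--     label = _SUFFIX_FLAGS_PREFIX.get(component)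
--     if label is not None:
--         return label
--     # Indexed suffix: split once at the LAST '_' instead of scanning every prefix.
--     base, sep, tail = component.rpartition('_')
--     if sep and tail.isdigit():
--         return _SUFFIX_FLAGS_PREFIX.get(base)
--     return None
-- ===== Notes on version B (the rewrite author's own statement) =====
-- stated objective: simpler
-- what changed: The per-prefix startswith/isdigit scanning loop is replaced by one rpartition split at the last underscore followed by a single direct dict lookup of the base (exact-match lookups kept first).
import Mathlib
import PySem

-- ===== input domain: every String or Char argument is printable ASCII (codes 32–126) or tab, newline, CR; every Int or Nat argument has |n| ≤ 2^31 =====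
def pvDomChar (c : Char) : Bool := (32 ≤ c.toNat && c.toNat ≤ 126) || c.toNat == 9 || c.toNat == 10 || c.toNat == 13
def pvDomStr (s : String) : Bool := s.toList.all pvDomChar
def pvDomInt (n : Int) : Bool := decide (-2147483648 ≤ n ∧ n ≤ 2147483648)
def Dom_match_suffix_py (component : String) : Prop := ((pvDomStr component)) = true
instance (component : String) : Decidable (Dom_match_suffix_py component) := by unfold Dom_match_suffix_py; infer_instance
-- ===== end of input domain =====

-- B replaces A's per-prefix startswith/isdigit scanning loop by a single rpartition split
-- at the last underscore plus one direct dict lookup of the base (objective: simpler).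


-- ===== PORT A =====
-- module constants _SUFFIX_FLAGS_EXACT / _SUFFIX_FLAGS_PREFIX (str keys as List Char)
def pvExactD : PySem.Dict (List Char) String :=
  PySem.Dict.ofList
    [("_redArg".toList, "arity↓"), ("_boxed".toList, "boxed"), ("_impl".toList, "impl")]
def pvPrefixD : PySem.Dict (List Char) String :=
  PySem.Dict.ofList
    [("_lam".toList, "λ"), ("_lambda".toList, "λ"), ("_elam".toList, "λ"),
     ("_jp".toList, "jp"), ("_closed".toList, "closed")]

-- the 'for prefix, label in _SUFFIX_FLAGS_PREFIX.items():' loop with its early return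
def pvLoopA (cs : List Char) : List (List Char × String) → Option String
  | [] => none
  | (pfx, label) :: rest =>
    if PySem.Chars.startswith cs (pfx ++ ['_']) then
      if PySem.Chars.strIsdigit (PySem.Chars.slice cs (some ((pfx.length : Int) + 1)) none) then
        some label
      else pvLoopA cs rest
    else pvLoopA cs rest

def match_suffix_py (component : String) : Option String :=
  let cs := component.toList
  if pvExactD.contains cs then pvExactD.get? cs
  else if pvPrefixD.contains cs then pvPrefixD.get? cs
  else pvLoopA cs pvPrefixD.items

-- ===== PORT B =====
-- hand port of str.rpartition('_') (PySem has no rpartition), exact: Python returns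
-- (base, '_', tail) splitting at the LAST '_' (here some (base, tail)), and
-- ('', '', s) when '_' is absent (here none).
def pvRpartU : List Char → Option (List Char × List Char)
  | [] => none
  | c :: rest =>
    match pvRpartU rest with
    | some (b, t) => some (c :: b, t)
    | none => if c = '_' then some ([], rest) else none

def match_suffix_py_alt (component : String) : Option String :=
  let cs := component.toList
  match pvExactD.get? cs with
  | some label => some label
  | none =>
    match pvPrefixD.get? cs with
    | some label => some label
    | none =>
      match pvRpartU cs with
      | none => none
      | some (base, tail) =>
        if PySem.Chars.strIsdigit tail then pvPrefixD.get? base else none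

-- ===== PRECONDITION & SPEC =====
def Spec_match_suffix_py (component : String) (out : Option String) : Prop := out = match_suffix_py_alt component
instance (component : String) (out : Option String) : Decidable (Spec_match_suffix_py component out) := by unfold Spec_match_suffix_py; infer_instance

-- ===== CLAIM (what is proved, stated in full; the proofs are below) =====
def Claim_equal_match_suffix_py : Prop := ∀ (component : String), Dom_match_suffix_py component → Spec_match_suffix_py component (match_suffix_py component)

-- ===== LEMMAS AND PROOFS =====

-- the loop test A applies to one prefix pfx
def pvCond (cs pfx : List Char) : Bool :=
  PySem.Chars.startswith cs (pfx ++ ['_']) &&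
    PySem.Chars.strIsdigit (PySem.Chars.slice cs (some ((pfx.length : Int) + 1)) none)

lemma pvLoopA_eq_cond (cs pfx : List Char) (label : String) (rest : List (List Char × String)) :
    pvLoopA cs ((pfx, label) :: rest) =
      if pvCond cs pfx then some label else pvLoopA cs rest := by
  simp only [pvLoopA, pvCond, Bool.and_eq_true]
  split_ifs with h <;> simp_all

lemma pvRpartU_none_not_mem (cs : List Char) (h : pvRpartU cs = none) : '_' ∉ cs := by
  induction cs with
  | nil => simp
  | cons c rest ih =>
    rw [pvRpartU] at h
    cases hr : pvRpartU rest with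
    | some p => rw [hr] at h; rcases p with ⟨_, _⟩; simp at h
    | none =>
      rw [hr] at h
      by_cases hc : c = '_'
      · simp [hc] at h
      · simp only [if_neg hc] at h
        intro hmem
        rcases List.mem_cons.mp hmem with h1 | h2
        · exact hc h1.symm
        · exact ih hr h2

lemma pvRpartU_sound (cs b t : List Char) (h : pvRpartU cs = some (b, t)) :
    cs = b ++ '_' :: t ∧ '_' ∉ t := by
  induction cs generalizing b t with
  | nil => simp [pvRpartU] at h
  | cons c rest ih =>
    rw [pvRpartU] at h
    cases hr : pvRpartU rest with
    | some p =>
      obtain ⟨b', t'⟩ := p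
      rw [hr] at h
      simp only [Option.some.injEq, Prod.mk.injEq] at h
      obtain ⟨hb, ht⟩ := h
      obtain ⟨he, hm⟩ := ih b' t' hr
      subst hb; subst ht; subst he; simp [hm]
    | none =>
      rw [hr] at h
      by_cases hc : c = '_'
      · simp only [hc, if_pos] at h
        obtain ⟨hb, ht⟩ := Prod.mk.injEq .. ▸ Option.some.injEq .. ▸ h
        subst hb; subst ht
        exact ⟨by simp [hc], pvRpartU_none_not_mem rest hr⟩
      · simp [hc] at h

lemma pvRpartU_complete (b t : List Char) (ht : '_' ∉ t) :
    pvRpartU (b ++ '_' :: t) = some (b, t) := by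
  induction b with
  | nil =>
    have hn : pvRpartU t = none := by
      cases hr : pvRpartU t with
      | none => rfl
      | some p =>
        rcases p with ⟨b', t'⟩
        obtain ⟨he, _⟩ := pvRpartU_sound t b' t' hr
        exact absurd (he ▸ (by simp : '_' ∈ b' ++ '_' :: t')) ht
    simp [pvRpartU, hn]
  | cons c bs ih =>
    simp [pvRpartU, ih]

lemma pvSlice_drop (cs : List Char) (n : Nat) :
    PySem.Chars.slice cs (some ((n : Int) + 1)) none = cs.drop (n + 1) := by
  have h : ((n : Int) + 1) = ((n + 1 : Nat) : Int) := by push_cast; ring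
  rw [h, PySem.Chars.slice_eq_listSlice, PySem.List.slice_from cs (Int.natCast_nonneg _)]
  simp

lemma pvStrIsdigit_not_underscore (t : List Char) (h : PySem.Chars.strIsdigit t = true) :
    '_' ∉ t := by
  simp only [PySem.Chars.strIsdigit, Bool.and_eq_true, List.all_eq_true] at h
  intro hm
  have := h.2 '_' hm
  simp [PySem.Chars.isdigit] at this

lemma pvCond_rpart (cs pfx : List Char) (h : pvCond cs pfx = true) :
    pvRpartU cs = some (pfx, cs.drop (pfx.length + 1)) ∧
      PySem.Chars.strIsdigit (cs.drop (pfx.length + 1)) = true := by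
  simp only [pvCond, Bool.and_eq_true] at h
  obtain ⟨hsw, hdig⟩ := h
  rw [pvSlice_drop] at hdig
  obtain ⟨rest, hrest⟩ := (PySem.Chars.startswith_iff cs (pfx ++ ['_'])).mp hsw
  have hcs : cs = pfx ++ '_' :: rest := by rw [← hrest]; simp
  have hdrop : cs.drop (pfx.length + 1) = rest := by
    rw [hcs]
    have : pfx ++ '_' :: rest = (pfx ++ ['_']) ++ rest := by simp
    rw [this, List.drop_left' (by simp)]
  rw [hdrop] at hdig ⊢
  refine ⟨?_, hdig⟩
  rw [hcs]
  exact pvRpartU_complete pfx rest (pvStrIsdigit_not_underscore rest hdig)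

lemma pvCond_of_rpart (cs b t : List Char) (h : pvRpartU cs = some (b, t))
    (hd : PySem.Chars.strIsdigit t = true) : pvCond cs b = true := by
  obtain ⟨hcs, _⟩ := pvRpartU_sound cs b t h
  have hdrop : cs.drop (b.length + 1) = t := by
    rw [hcs]
    have : b ++ '_' :: t = (b ++ ['_']) ++ t := by simp
    rw [this, List.drop_left' (by simp)]
  simp only [pvCond, Bool.and_eq_true]
  constructor
  · rw [PySem.Chars.startswith_iff, hcs]
    exact ⟨t, by simp⟩
  · rw [pvSlice_drop, hdrop]; exact hd

-- the scanning loop computes a first-match lookup of b whenever pvCond · = (· = b)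
lemma pvLoopA_eq_get (cs b : List Char) (items : List (List Char × String))
    (hb : ∀ p, pvCond cs p = true ↔ p = b) :
    pvLoopA cs items = (PySem.Dict.mk items).get? b := by
  induction items with
  | nil => simp [pvLoopA, PySem.Dict.get?]
  | cons pr rest ih =>
    rcases pr with ⟨pfx, label⟩
    rw [pvLoopA_eq_cond, PySem.Dict.get?_mk_cons, ih]
    by_cases hc : pvCond cs pfx = true
    · rw [if_pos hc, if_pos (by simp [(hb pfx).mp hc])]
    · rw [if_neg hc, if_neg (by simp; intro he; exact hc ((hb pfx).mpr he))]

lemma pvLoopA_none (cs : List Char) (items : List (List Char × String))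
    (hb : ∀ p, pvCond cs p = false) :
    pvLoopA cs items = none := by
  induction items with
  | nil => simp [pvLoopA]
  | cons pr rest ih =>
    rcases pr with ⟨pfx, label⟩
    rw [pvLoopA_eq_cond, if_neg (by simp [hb pfx]), ih]

-- core: A's loop = B's rpartition-and-lookup, for any input
lemma pvLoop_core (cs : List Char) :
    pvLoopA cs pvPrefixD.items =
      (match pvRpartU cs with
       | none => none
       | some (base, tail) =>
         if PySem.Chars.strIsdigit tail then pvPrefixD.get? base else none) := by
  cases hr : pvRpartU cs with
  | none =>
    refine pvLoopA_none cs _ (fun p => ?_)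
    by_contra hc
    have := (pvCond_rpart cs p (by revert hc; cases pvCond cs p <;> simp)).1
    rw [hr] at this; exact absurd this (by simp)
  | some pr =>
    rcases pr with ⟨b, t⟩
    by_cases hd : PySem.Chars.strIsdigit t = true
    · simp only [hd, if_pos]
      have : pvPrefixD.get? b = (PySem.Dict.mk pvPrefixD.items).get? b := rfl
      rw [this]
      refine pvLoopA_eq_get cs b _ (fun p => ?_)
      constructor
      · intro hc
        have h1 := (pvCond_rpart cs p hc).1
        rw [hr] at h1
        simp only [Option.some.injEq, Prod.mk.injEq] at h1
        exact h1.1.symm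
      · intro he; subst he; exact pvCond_of_rpart cs p t hr hd
    · simp only [if_neg hd]
      refine pvLoopA_none cs _ (fun p => ?_)
      by_contra hc
      have hc' : pvCond cs p = true := by revert hc; cases pvCond cs p <;> simp
      obtain ⟨h1, h2⟩ := pvCond_rpart cs p hc'
      rw [hr] at h1
      obtain ⟨hb, ht⟩ : p = b ∧ cs.drop (p.length + 1) = t := by
        constructor <;> simp_all
      rw [ht] at h2
      exact hd h2

lemma pvContains_get? (d : PySem.Dict (List Char) String) (k : List Char) :
    d.contains k = (d.get? k).isSome := by
  rcases d with ⟨items⟩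
  induction items with
  | nil => simp [PySem.Dict.contains, PySem.Dict.get?]
  | cons pr rest ih =>
    rcases pr with ⟨k', v⟩
    rw [PySem.Dict.get?_mk_cons]
    by_cases he : (k' == k) = true
    · simp [PySem.Dict.contains, he]
    · simp only [if_neg he, ← ih]
      simp only [PySem.Dict.contains, List.any_cons]
      simp [he]

-- ===== VERDICT (by name: the statement is the Claim_ definition above) =====
theorem match_suffix_py_spec : Claim_equal_match_suffix_py := by
  intro component _
  unfold Spec_match_suffix_py match_suffix_py match_suffix_py_alt
  simp only []
  rw [pvContains_get?, pvContains_get?]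
  cases h1 : pvExactD.get? component.toList with
  | some v => simp
  | none =>
    cases h2 : pvPrefixD.get? component.toList with
    | some v => simp
    | none =>
      simp only [Option.isSome_none, Bool.false_eq_true, if_false]
      exact pvLoop_core component.toList
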